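-- pv_equiv track=rewrite | github.com/wojtek2288/MCTSConnectFour | state.py | check_array_v2
-- ===== SOURCE A (Python) =====
-- def check_array_v2(array, player, sequence_number):
--     for i in range(len(array) - sequence_number):
--         player_count = 0
--         empty_count = 0
--         for j in range(sequence_number + 1):
--             if array[i + j] == player:
--                 player_count += 1
--             elif array[i + j] == 0:
--                 empty_count += 1
--         if player_count == sequence_number and empty_count == 1:
--             return True
--     return False
-- ===== SOURCE B (Python) =====
-- def check_array_v2(array, player, sequence_number):
--     k = sequence_number
--     n = len(array)
--     if k < 0 or n < k + 1:
--         return False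
--     w = k + 1
--     pc = 0
--     ec = 0
--     for x in array[:w]:
--         if x == player:
--             pc += 1
--         elif x == 0:
--             ec += 1
--     if pc == k and ec == 1:
--         return True
--     for i in range(w, n):
--         x = array[i]
--         out = array[i - w]
--         if x == player:
--             pc += 1
--         elif x == 0:
--             ec += 1
--         if out == player:
--             pc -= 1
--         elif out == 0:
--             ec -= 1
--         if pc == k and ec == 1:
--             return True
--     return False
-- ===== Notes on version B (the rewrite author's own statement) =====
-- stated objective: faster
-- what changed: Replaced the recount-every-window nested loop with a single sliding-window pass that updates the player/empty counts incrementally as the window moves.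
import Mathlib
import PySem

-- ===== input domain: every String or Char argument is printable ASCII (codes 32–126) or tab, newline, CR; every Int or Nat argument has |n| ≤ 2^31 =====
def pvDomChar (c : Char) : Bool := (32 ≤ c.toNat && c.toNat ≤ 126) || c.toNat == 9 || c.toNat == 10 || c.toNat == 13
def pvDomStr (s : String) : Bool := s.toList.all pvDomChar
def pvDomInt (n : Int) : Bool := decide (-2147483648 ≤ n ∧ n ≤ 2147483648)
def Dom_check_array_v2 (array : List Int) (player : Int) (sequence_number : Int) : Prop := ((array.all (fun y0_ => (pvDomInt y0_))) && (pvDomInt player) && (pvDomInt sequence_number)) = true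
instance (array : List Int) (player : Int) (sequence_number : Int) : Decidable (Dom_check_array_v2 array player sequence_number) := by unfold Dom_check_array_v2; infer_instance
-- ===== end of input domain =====

-- B replaces A's recount-of-every-window nested loop by a single sliding-window pass with
-- incremental count updates (objective: faster, O(n*k) → O(n)).

-- shared branch shape: 'if x == player: pc += 1 elif x == 0: ec += 1' on a (pc, ec) pair
def pvAdd (player : Int) (s : Int × Int) (x : Int) : Int × Int :=
  if x = player then (s.1 + 1, s.2) else if x = 0 then (s.1, s.2 + 1) else s

-- ===== PORT A =====
def check_array_v2 (array : List Int) (player : Int) (sequence_number : Int) : Bool :=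
  (PySem.List.pyRange 0 ((array.length : Int) - sequence_number) 1).foldl
    (fun acc i =>
      acc ||
        (let s := (PySem.List.pyRange 0 (sequence_number + 1) 1).foldl
            (fun s j => pvAdd player s (PySem.List.pyGetD array (i + j) 0)) (0, 0)
         decide (s.1 = sequence_number) && decide (s.2 = 1)))
    false

-- ===== PORT B =====
-- 'if out == player: pc -= 1 elif out == 0: ec -= 1'
def pvSub (player : Int) (s : Int × Int) (x : Int) : Int × Int :=
  if x = player then (s.1 - 1, s.2) else if x = 0 then (s.1, s.2 - 1) else s

def check_array_v2_alt (array : List Int) (player : Int) (sequence_number : Int) : Bool :=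
  if sequence_number < 0 || (array.length : Int) < sequence_number + 1 then false
  else
    let w := sequence_number + 1
    let s0 := (PySem.List.slice array none (some w)).foldl (pvAdd player) (0, 0)
    if decide (s0.1 = sequence_number) && decide (s0.2 = 1) then true
    else
      let r := (PySem.List.pyRange w (array.length : Int) 1).foldl
        (fun (s : Int × Int × Bool) i =>
          if s.2.2 then s
          else
            let x := PySem.List.pyGetD array i 0
            let out := PySem.List.pyGetD array (i - w) 0
            let s1 := pvAdd player (s.1, s.2.1) x
            let s2 := pvSub player s1 out
            (s2.1, s2.2, decide (s2.1 = sequence_number) && decide (s2.2 = 1)))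
        (s0.1, s0.2, false)
      r.2.2

-- ===== PRECONDITION & SPEC =====
def Spec_check_array_v2 (array : List Int) (player : Int) (sequence_number : Int) (out : Bool) : Prop := out = check_array_v2_alt array player sequence_number
instance (array : List Int) (player : Int) (sequence_number : Int) (out : Bool) : Decidable (Spec_check_array_v2 array player sequence_number out) := by unfold Spec_check_array_v2; infer_instance

-- ===== CLAIM (what is proved, stated in full; the proofs are below) =====
def Claim_equal_check_array_v2 : Prop := ∀ (array : List Int) (player : Int) (sequence_number : Int), Dom_check_array_v2 array player sequence_number → Spec_check_array_v2 array player sequence_number (check_array_v2 array player sequence_number)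

-- ===== LEMMAS AND PROOFS =====

-- player count and empty count of a window, as the ports compute them
def pvPC (player : Int) (l : List Int) : Int := (l.countP (fun x => decide (x = player)) : Int)
def pvEC (player : Int) (l : List Int) : Int := (l.countP (fun x => decide (¬ x = player ∧ x = 0)) : Int)

-- the per-window success test, window starting at t with width seq.toNat+1
def pvQ (xs : List Int) (player seq : Int) (t : Nat) : Bool :=
  decide (pvPC player ((xs.drop t).take (seq.toNat + 1)) = seq) &&
  decide (pvEC player ((xs.drop t).take (seq.toNat + 1)) = 1)

theorem pv_foldl_or {α : Type} (f : α → Bool) (l : List α) (b : Bool) :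
    l.foldl (fun a x => a || f x) b = (b || l.any f) := by
  induction l generalizing b with
  | nil => simp
  | cons x t ih => simp [ih, Bool.or_assoc]

theorem pv_foldl_add (player : Int) (l : List Int) (s : Int × Int) :
    l.foldl (pvAdd player) s = (s.1 + pvPC player l, s.2 + pvEC player l) := by
  induction l generalizing s with
  | nil => simp [pvPC, pvEC]
  | cons x t ih =>
    rw [List.foldl_cons, ih]
    simp only [pvAdd, pvPC, pvEC, List.countP_cons]
    by_cases hx : x = player
    · simp [hx]; ring
    · by_cases h0 : x = 0
      · have hp : ¬ (0 : Int) = player := h0 ▸ hx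
        simp [h0, hp]; ring
      · simp [hx, h0]

theorem pv_any_congr_mem {α : Type} {l : List α} {f g : α → Bool}
    (h : ∀ x ∈ l, f x = g x) : l.any f = l.any g := by
  induction l with
  | nil => rfl
  | cons x t ih =>
    simp only [List.any_cons, h x List.mem_cons_self, ih fun y hy => h y (List.mem_cons_of_mem x hy)]

theorem pv_window_map (xs : List Int) (t m : Nat) (h : t + m ≤ xs.length) :
    (List.range m).map (fun (j : Nat) => PySem.List.pyGetD xs ((t : Int) + (j : Int)) 0) =
      (xs.drop t).take m := by
  apply List.ext_getElem
  · simp; omega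
  · intro j h1 h2
    simp only [List.getElem_map, List.getElem_range, List.getElem_take, List.getElem_drop]
    rw [show ((t : Int) + (j : Int)) = ((t + j : Nat) : Int) by push_cast; ring]
    rw [PySem.List.pyGetD_natCast]
    simp only [List.length_map, List.length_range] at h1
    rw [List.getD_eq_getElem xs 0 (by omega)]

-- A equals "some window of width seq.toNat+1 passes the test" (for seq ≥ 0)
theorem pv_A_char (xs : List Int) (player seq : Int) (h : 0 ≤ seq) :
    check_array_v2 xs player seq =
      (List.range (((xs.length : Int) - seq).toNat)).any (pvQ xs player seq) := by
  unfold check_array_v2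
  rw [pv_foldl_or]
  rw [Bool.false_or]
  rw [PySem.List.pyRange_one, List.any_map]
  rw [show ((xs.length : Int) - seq - 0).toNat = ((xs.length : Int) - seq).toNat by omega]
  apply pv_any_congr_mem
  intro t ht
  have ht' : t < ((xs.length : Int) - seq).toNat := List.mem_range.mp ht
  have hb : t + (seq.toNat + 1) ≤ xs.length := by omega
  simp only [Function.comp_apply, zero_add]
  rw [PySem.List.pyRange_one]
  rw [show (seq + 1 - 0).toNat = seq.toNat + 1 by omega]
  simp only [zero_add]
  rw [List.foldl_map]
  rw [show List.foldl (fun (x : Int × Int) (y : Nat) => pvAdd player x (PySem.List.pyGetD xs ((t : Int) + (y : Int)) 0)) (0, 0) (List.range (seq.toNat + 1))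
        = ((List.range (seq.toNat + 1)).map (fun (j : Nat) => PySem.List.pyGetD xs ((t : Int) + (j : Int)) 0)).foldl (pvAdd player) (0, 0)
      from List.foldl_map.symm]
  rw [pv_window_map xs t (seq.toNat + 1) hb]
  rw [pv_foldl_add]
  simp [pvQ]

-- A is false for negative seq
theorem pv_A_neg (xs : List Int) (player seq : Int) (h : seq < 0) :
    check_array_v2 xs player seq = false := by
  unfold check_array_v2
  rw [pv_foldl_or]
  rw [Bool.false_or]
  apply List.any_eq_false.mpr
  intro i _
  rw [PySem.List.pyRange_one_eq_nil (by omega)]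
  simp

-- sliding the window one step right updates the counts incrementally
theorem pv_step (xs : List Int) (player seq : Int) (t : Nat)
    (h : t + (seq.toNat + 1) < xs.length) :
    pvSub player
      (pvAdd player
         (pvPC player ((xs.drop t).take (seq.toNat + 1)),
          pvEC player ((xs.drop t).take (seq.toNat + 1)))
         (xs[t + (seq.toNat + 1)]'h))
      (xs[t]'(by omega)) =
    (pvPC player ((xs.drop (t + 1)).take (seq.toNat + 1)),
     pvEC player ((xs.drop (t + 1)).take (seq.toNat + 1))) := by
  have f1 : (xs.drop t).take (seq.toNat + 1)
      = xs[t]'(by omega) :: (xs.drop (t + 1)).take seq.toNat := by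
    rw [List.drop_eq_getElem_cons (by omega), List.take_succ_cons]
  have f2 : (xs.drop (t + 1)).take (seq.toNat + 1)
      = (xs.drop (t + 1)).take seq.toNat ++ [xs[t + (seq.toNat + 1)]'h] := by
    rw [List.take_add_one]
    congr 1
    rw [List.getElem?_drop]
    rw [show t + 1 + seq.toNat = t + (seq.toNat + 1) by omega]
    rw [List.getElem?_eq_getElem h]
    rfl
  rw [f1, f2]
  simp only [pvPC, pvEC, List.countP_cons, List.countP_append, List.countP_nil]
  generalize (xs.drop (t + 1)).take seq.toNat = mid
  generalize xs[t + (seq.toNat + 1)]'h = a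
  generalize xs[t]'(Nat.lt_of_le_of_lt (Nat.le_add_right t (seq.toNat + 1)) h) = b
  unfold pvAdd pvSub
  split_ifs <;> simp_all

-- loop invariant for B's sliding pass
theorem pv_B_loop (xs : List Int) (player seq : Int) (h : 0 ≤ seq)
    (hQ0 : pvQ xs player seq 0 = false) (m : Nat)
    (hw : seq.toNat + 1 ≤ m) (hm : m ≤ xs.length) :
    (PySem.List.pyRange (seq + 1) (m : Int) 1).foldl
        (fun (s : Int × Int × Bool) i =>
          if s.2.2 then s
          else
            let x := PySem.List.pyGetD xs i 0
            let out := PySem.List.pyGetD xs (i - (seq + 1)) 0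
            let s1 := pvAdd player (s.1, s.2.1) x
            let s2 := pvSub player s1 out
            (s2.1, s2.2, decide (s2.1 = seq) && decide (s2.2 = 1)))
        (pvPC player (xs.take (seq.toNat + 1)), pvEC player (xs.take (seq.toNat + 1)), false)
      = (pvPC player ((xs.drop (m - (seq.toNat + 1))).take (seq.toNat + 1)),
         pvEC player ((xs.drop (m - (seq.toNat + 1))).take (seq.toNat + 1)),
         (List.range (m - (seq.toNat + 1) + 1)).any (pvQ xs player seq)) ∨
      (((PySem.List.pyRange (seq + 1) (m : Int) 1).foldl
        (fun (s : Int × Int × Bool) i =>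
          if s.2.2 then s
          else
            let x := PySem.List.pyGetD xs i 0
            let out := PySem.List.pyGetD xs (i - (seq + 1)) 0
            let s1 := pvAdd player (s.1, s.2.1) x
            let s2 := pvSub player s1 out
            (s2.1, s2.2, decide (s2.1 = seq) && decide (s2.2 = 1)))
        (pvPC player (xs.take (seq.toNat + 1)), pvEC player (xs.take (seq.toNat + 1)), false)).2.2
        = true ∧ (List.range (m - (seq.toNat + 1) + 1)).any (pvQ xs player seq) = true) := by
  revert hm
  induction m, hw using Nat.le_induction with
  | base =>
    intro hm
    rw [PySem.List.pyRange_one_eq_nil (by omega)]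
    left
    simp only [List.foldl_nil, Nat.sub_self, List.drop_zero]
    rw [show (0 : Nat) + 1 = 1 from rfl]
    simp [hQ0]
  | succ m hm ih =>
    intro hm1
    have ihd := ih (by omega)
    rw [show ((m + 1 : Nat) : Int) = (m : Int) + 1 by push_cast; ring]
    rw [PySem.List.pyRange_one_succ_right (by omega)]
    rw [List.foldl_append, List.foldl_cons, List.foldl_nil]
    rcases ihd with hL | ⟨hT, hA⟩
    · rw [hL]
      cases hAny : (List.range (m - (seq.toNat + 1) + 1)).any (pvQ xs player seq) with
      | true =>
        right
        constructor
        · simp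
        · rw [show m + 1 - (seq.toNat + 1) + 1 = (m - (seq.toNat + 1) + 1) + 1 by omega,
              List.range_succ, List.any_append, hAny]
          simp
      | false =>
        left
        rw [if_neg (by simp)]
        have hx : PySem.List.pyGetD xs (m : Int) 0 = xs[m]'(by omega) := by
          rw [PySem.List.pyGetD_natCast, List.getD_eq_getElem xs 0 (by omega)]
        have hout : PySem.List.pyGetD xs ((m : Int) - (seq + 1)) 0
            = xs[m - (seq.toNat + 1)]'(by omega) := by
          rw [show ((m : Int) - (seq + 1)) = ((m - (seq.toNat + 1) : Nat) : Int) by omega]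
          rw [PySem.List.pyGetD_natCast, List.getD_eq_getElem xs 0 (by omega)]
        simp only [hx, hout]
        have hstep := pv_step xs player seq (m - (seq.toNat + 1)) (by omega)
        simp only [show m - (seq.toNat + 1) + (seq.toNat + 1) = m from by omega] at hstep
        simp only [hstep]
        rw [show m + 1 - (seq.toNat + 1) = m - (seq.toNat + 1) + 1 by omega]
        rw [show m - (seq.toNat + 1) + 1 + 1 = (m - (seq.toNat + 1) + 1) + 1 by omega]
        rw [List.range_succ, List.any_append, hAny]
        simp [pvQ]
    · rw [hT]
      right
      constructor
      · simp [hT]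
      · 
        rw [show m + 1 - (seq.toNat + 1) + 1 = (m - (seq.toNat + 1) + 1) + 1 by omega]
        rw [List.range_succ, List.any_append]
        simp [hA]

theorem pv_main (xs : List Int) (player seq : Int) :
    check_array_v2 xs player seq = check_array_v2_alt xs player seq := by
  by_cases hneg : seq < 0
  · rw [pv_A_neg xs player seq hneg]
    unfold check_array_v2_alt
    rw [if_pos (by simp [hneg])]
  · have h0 : 0 ≤ seq := by omega
    rw [pv_A_char xs player seq h0]
    unfold check_array_v2_alt
    by_cases hn : (xs.length : Int) < seq + 1
    · rw [if_pos (by simp [hn])]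
      rw [show ((xs.length : Int) - seq).toNat = 0 by omega]
      simp
    · rw [if_neg (by simp only [Bool.or_eq_true, decide_eq_true_eq, not_or]; omega)]
      simp only [PySem.List.slice_to xs (show (0:Int) ≤ seq + 1 by omega)]
      rw [show (seq + 1).toNat = seq.toNat + 1 by omega]
      rw [pv_foldl_add]
      simp only [zero_add]
      cases hq : pvQ xs player seq 0 with
      | true =>
        rw [if_pos (by simpa [pvQ] using hq)]
        apply List.any_eq_true.mpr
        exact ⟨0, List.mem_range.mpr (by omega), hq⟩
      | false =>
        rw [if_neg (by simpa [pvQ] using hq)]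
        rcases pv_B_loop xs player seq h0 hq xs.length (by omega) (le_refl _) with hL | ⟨hT, hA⟩
        · rw [hL]
          rw [show ((xs.length : Int) - seq).toNat = xs.length - (seq.toNat + 1) + 1 by omega]
        · rw [hT]
          rw [show ((xs.length : Int) - seq).toNat = xs.length - (seq.toNat + 1) + 1 by omega]
          exact hA

-- ===== VERDICT (by name: the statement is the Claim_ definition above) =====
theorem check_array_v2_spec : Claim_equal_check_array_v2 := by
  intro array player seq _
  unfold Spec_check_array_v2
  exact pv_main array player seq
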